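-- pv_equiv track=rewrite | github.com/DavidPerelman/web-gis-scraper-desktop-electron | backend/utils/ocr_table_utils.py | merge_header_lines
-- ===== SOURCE A (Python) =====
-- def merge_header_lines(header_lines: list[str]) -> list[str]:
--     merged = []
--     buffer = ""
--
--     for line in header_lines:
--         line = line.strip()
--         if not line:
--             continue
--
--         if buffer:
--             if len(line.split()) <= 4:
--                 buffer += " / " + line
--             else:
--                 merged.append(buffer)
--                 buffer = line
--         else:
--             buffer = line
--
--     if buffer:
--         merged.append(buffer)
--
--     return merged
-- ===== SOURCE B (Python) =====
-- def merge_header_lines(header_lines: list[str]) -> list[str]: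
--     ls = [s for s in (line.strip() for line in header_lines) if s]
--     return _groups(ls)
--
--
-- def _groups(ls):
--     if not ls:
--         return []
--     k = 1
--     while k < len(ls) and len(ls[k].split()) <= 4:
--         k += 1
--     return [" / ".join(ls[:k])] + _groups(ls[k:])
-- ===== Notes on version B (the rewrite author's own statement) =====
-- stated objective: alternative
-- what changed: B first builds the list of stripped non-empty lines, then recursively cuts it into whole groups (scanning the span of <=4-word continuation lines and slicing) and joins each group once, instead of A's single pass that grows a running string buffer and flushes it.
import Mathlib
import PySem

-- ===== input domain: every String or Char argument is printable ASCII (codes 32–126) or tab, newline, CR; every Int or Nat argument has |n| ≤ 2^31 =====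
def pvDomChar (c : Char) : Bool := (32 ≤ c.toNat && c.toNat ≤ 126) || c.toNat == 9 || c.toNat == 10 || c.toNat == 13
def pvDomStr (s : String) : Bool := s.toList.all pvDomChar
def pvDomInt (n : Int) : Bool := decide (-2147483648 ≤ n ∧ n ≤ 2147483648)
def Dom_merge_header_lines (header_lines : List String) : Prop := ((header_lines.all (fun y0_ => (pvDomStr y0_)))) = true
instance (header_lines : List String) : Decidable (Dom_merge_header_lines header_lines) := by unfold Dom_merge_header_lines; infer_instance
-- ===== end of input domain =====

-- B re-implements A with a different decomposition (clean the lines once, then cut whole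
-- groups by span-scan + slice and join each group once, recursively), same cost; proved equal.

-- ===== PORT A =====
-- A's loop body: strip, skip blanks, extend or flush the running buffer.
def pvMergeStep (acc : List String × String) (line : String) : List String × String :=
  let line := PySem.Str.strip line
  if line = "" then acc
  else if acc.2 ≠ "" then
    if (PySem.Str.split₀ line).length ≤ 4 then (acc.1, acc.2 ++ " / " ++ line)
    else (acc.1 ++ [acc.2], line)
  else (acc.1, line)

def merge_header_lines (header_lines : List String) : List String :=
  let st := header_lines.foldl pvMergeStep ([], "")
  if st.2 ≠ "" then st.1 ++ [st.2] else st.1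

-- ===== PORT B =====
def pvWc (s : String) : Nat := (PySem.Str.split₀ s).length

-- the inner while of _groups: k-1 = number of leading continuation lines (≤ 4 words) of the tail
def pvSpanLen (xs : List String) : Nat :=
  match xs with
  | [] => 0
  | y :: ys => if pvWc y ≤ 4 then pvSpanLen ys + 1 else 0

-- _groups: cut off one whole group ls[:k], join it, recurse on ls[k:]
def pvGroups (ls : List String) : List String :=
  match ls with
  | [] => []
  | x :: xs =>
      let k : Nat := pvSpanLen xs + 1
      PySem.Str.join " / " (PySem.List.slice (x :: xs) none (some (k : Int))) ::
        pvGroups (PySem.List.slice (x :: xs) (some (k : Int)) none)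
termination_by ls.length
decreasing_by
  rw [PySem.List.slice_from_natCast]
  simp

def merge_header_lines_alt (header_lines : List String) : List String :=
  pvGroups ((header_lines.map PySem.Str.strip).filter (fun s => s ≠ ""))

-- ===== PRECONDITION & SPEC =====
def Spec_merge_header_lines (header_lines : List String) (out : List String) : Prop := out = merge_header_lines_alt header_lines
instance (header_lines : List String) (out : List String) : Decidable (Spec_merge_header_lines header_lines out) := by unfold Spec_merge_header_lines; infer_instance

-- ===== CLAIM (what is proved, stated in full; the proofs are below) =====
def Claim_equal_merge_header_lines : Prop := ∀ (header_lines : List String), Dom_merge_header_lines header_lines → Spec_merge_header_lines header_lines (merge_header_lines header_lines)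

-- ===== LEMMAS AND PROOFS =====

-- string facts
theorem pv_str_append_assoc (a b c : String) : a ++ b ++ c = a ++ (b ++ c) := by
  apply String.ext
  simp

theorem pv_str_append_ne_empty (a b : String) (h : a ≠ "") : a ++ b ≠ "" := by
  intro hc
  apply h
  apply String.ext
  have := congrArg String.toList hc
  simp at this
  simp [this.1]

-- A's behaviour on the cleaned list, with an open (nonempty) buffer
def pvOpenG (b : String) : List String → List String
  | [] => [b]
  | y :: ys => if pvWc y ≤ 4 then pvOpenG (b ++ " / " ++ y) ys else b :: pvOpenG y ys

-- what the buffer still owes: the joined tail of continuation lines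
def pvTail : List String → String
  | [] => ""
  | y :: ys => if pvWc y ≤ 4 then " / " ++ y ++ pvTail ys else ""

-- rest of the list after the continuation lines
def pvDropP : List String → List String
  | [] => []
  | y :: ys => if pvWc y ≤ 4 then pvDropP ys else y :: ys

def pvClean (hls : List String) : List String :=
  (hls.map PySem.Str.strip).filter (fun s => s ≠ "")

def pvFinalize (st : List String × String) : List String :=
  if st.2 ≠ "" then st.1 ++ [st.2] else st.1

def pvGA (l : List String) : List String :=
  match l with
  | [] => []
  | x :: xs => pvOpenG x xs

theorem pvA1 (hls : List String) : ∀ (m : List String) (b : String), b ≠ "" →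
    pvFinalize (hls.foldl pvMergeStep (m, b)) = m ++ pvOpenG b (pvClean hls) := by
  induction hls with
  | nil => intro m b hb; simp [pvFinalize, pvOpenG, pvClean, hb]
  | cons line rest ih =>
    intro m b hb
    by_cases hs : PySem.Str.strip line = ""
    · simp [pvClean, pvMergeStep, hs]
      simpa [pvClean] using ih m b hb
    · by_cases hp : (PySem.Str.split₀ (PySem.Str.strip line)).length ≤ 4
      · have := ih m (b ++ " / " ++ PySem.Str.strip line)
          (pv_str_append_ne_empty _ _ (pv_str_append_ne_empty _ _ hb))
        simp [pvClean, pvMergeStep, hs, hb, hp, pvOpenG, pvWc] at this ⊢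
        simpa [pvClean] using this
      · have := ih (m ++ [b]) (PySem.Str.strip line) hs
        simp [pvClean, pvMergeStep, hs, hb, hp, pvOpenG, pvWc] at this ⊢
        simpa [pvClean] using this

theorem pvA0 (hls : List String) : ∀ (m : List String),
    pvFinalize (hls.foldl pvMergeStep (m, "")) = m ++ pvGA (pvClean hls) := by
  induction hls with
  | nil => intro m; simp [pvFinalize, pvGA, pvClean]
  | cons line rest ih =>
    intro m
    by_cases hs : PySem.Str.strip line = ""
    · simp [pvClean, pvMergeStep, hs]
      simpa [pvClean] using ih m
    · have := pvA1 rest m (PySem.Str.strip line) hs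
      simp [pvClean, pvMergeStep, hs, pvGA] at this ⊢
      simpa [pvClean] using this

theorem pv_str_join_singleton (sep a : String) : PySem.Str.join sep [a] = a := by
  apply String.ext
  simp [PySem.Str.join, PySem.Chars.join_singleton]

theorem pv_str_join_cons_cons (sep a b : String) (l : List String) :
    PySem.Str.join sep (a :: b :: l) = a ++ sep ++ PySem.Str.join sep (b :: l) := by
  apply String.ext
  simp [PySem.Str.join, PySem.Chars.join_cons_cons]

-- join of a group: head plus the continuation tail
theorem pvJoinTake (xs : List String) : ∀ (x : String),
    PySem.Str.join " / " (x :: xs.take (pvSpanLen xs)) = x ++ pvTail xs := by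
  induction xs with
  | nil =>
    intro x
    simp [pvSpanLen, pvTail, pv_str_join_singleton]
  | cons y ys ih =>
    intro x
    by_cases hp : pvWc y ≤ 4
    · simp only [pvSpanLen, pvTail, if_pos hp, List.take_succ_cons]
      rw [pv_str_join_cons_cons, ih y]
      simp [pv_str_append_assoc]
    · simp [pvSpanLen, pvTail, hp, pv_str_join_singleton]

theorem pvDropSpan (xs : List String) : xs.drop (pvSpanLen xs) = pvDropP xs := by
  induction xs with
  | nil => rfl
  | cons y ys ih =>
    by_cases hp : pvWc y ≤ 4
    · simp [pvSpanLen, pvDropP, hp, ih]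
    · simp [pvSpanLen, pvDropP, hp]

theorem pvB2 (x : String) (xs : List String) :
    pvGroups (x :: xs) = (x ++ pvTail xs) :: pvGroups (pvDropP xs) := by
  rw [pvGroups, PySem.List.slice_to_natCast, PySem.List.slice_from_natCast]
  simp only [List.take_succ_cons, List.drop_succ_cons, pvJoinTake, pvDropSpan]

theorem pvB1 (l : List String) : ∀ (b : String),
    pvOpenG b l = (b ++ pvTail l) :: pvGroups (pvDropP l) := by
  induction l with
  | nil => intro b; simp [pvOpenG, pvTail, pvDropP, pvGroups]
  | cons y ys ih =>
    intro b
    by_cases hp : pvWc y ≤ 4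
    · simp [pvOpenG, pvTail, pvDropP, hp, ih, pv_str_append_assoc]
    · simp [pvOpenG, pvTail, pvDropP, hp, ih y, pvB2]

theorem pvGA_eq_groups (l : List String) : pvGA l = pvGroups l := by
  cases l with
  | nil => simp [pvGA, pvGroups]
  | cons x xs => rw [pvGA, pvB1, pvB2]

-- ===== VERDICT (by name: the statement is the Claim_ definition above) =====
theorem merge_header_lines_spec : Claim_equal_merge_header_lines := by
  intro hls _
  unfold Spec_merge_header_lines merge_header_lines merge_header_lines_alt
  have := pvA0 hls []
  simp [pvFinalize, pvClean] at this
  rw [← pvGA_eq_groups]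
  simpa using this
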